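-- pv_equiv track=rewrite | github.com/vzsky/lonely-runners | happy_check.py | check_seed
-- ===== SOURCE A (Python) =====
-- def check_seed(seed, p, k):
--     target = set(range(1, k + 1))
--     for a in range(1, p):
--         image = set((a * s) % p for s in seed)
--         if len(image) != k:
--             continue
--         abs_image = set(min(x, p - x) for x in image)
--         if abs_image == target:
--             signs = {min(x, p-x): ('+' if x <= p//2 else '-') for x in image}
--             return True, a, signs
--     return False, None, None
-- ===== SOURCE B (Python) =====
-- def _egcd(a, b):
--     # extended Euclid: returns (g, x, y) with x*a + y*b = g = gcd(a, b), for a, b >= 0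
--     if b == 0:
--         return a, 1, 0
--     g, x, y = _egcd(b, a % b)
--     return g, y, x - (a // b) * y
--
--
-- def check_seed(seed, p, k):
--     if p <= 1:
--         return False, None, None
--     if not seed:
--         return (True, 1, {}) if k == 0 else (False, None, None)
--     if k < 1 or k > p // 2 or k > len(seed):
--         return False, None, None
--     s0 = seed[0] % p
--     if s0 == 0:
--         return False, None, None
--     g, x, _ = _egcd(s0, p)
--     q = p // g
--     inv = x % q
--     # any valid multiplier a satisfies a*s0 = +-j (mod p) for some 1 <= j <= k,
--     # which forces g | j and a = (inv * (t // g)) % q + m*q for t in {j, p-j}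
--     cands = set()
--     for j in range(g, k + 1, g):
--         for t in (j, p - j):
--             base = (inv * (t // g)) % q
--             for m in range(g):
--                 a = base + m * q
--                 if 1 <= a < p:
--                     cands.add(a)
--     for a in sorted(cands):
--         image = set((a * s) % p for s in seed)
--         if len(image) != k:
--             continue
--         if {min(v, p - v) for v in image} != set(range(1, k + 1)):
--             continue
--         return True, a, {min(v, p - v): ('+' if v <= p // 2 else '-') for v in image}
--     return False, None, None
-- ===== Notes on version B (the rewrite author's own statement) =====
-- stated objective: faster
-- what changed: Instead of scanning every multiplier a in 1..p-1 and rebuilding the residue image for each, B solves a*seed[0] = +-j (mod p) for j in 1..k with one extended-Euclid inverse, generating only the ~2k candidate multipliers consistent with the first seed element, and verifies those in increasing order.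
import Mathlib
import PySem

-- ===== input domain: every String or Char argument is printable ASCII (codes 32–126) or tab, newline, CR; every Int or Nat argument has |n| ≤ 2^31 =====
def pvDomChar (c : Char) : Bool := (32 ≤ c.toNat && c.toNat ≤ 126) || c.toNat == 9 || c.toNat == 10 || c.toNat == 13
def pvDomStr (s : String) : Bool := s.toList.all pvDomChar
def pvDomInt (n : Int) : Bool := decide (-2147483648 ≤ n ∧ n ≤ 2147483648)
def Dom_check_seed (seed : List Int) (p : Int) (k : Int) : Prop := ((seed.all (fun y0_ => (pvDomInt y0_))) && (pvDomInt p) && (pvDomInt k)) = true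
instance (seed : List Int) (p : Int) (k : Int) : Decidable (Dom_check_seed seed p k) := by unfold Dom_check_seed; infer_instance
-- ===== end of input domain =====

-- B replaces A's scan of every multiplier a in 1..p-1 by solving a*seed[0] ≡ ±j (mod p)
-- for j in 1..k with an extended-Euclid inverse, verifying only those O(k) candidates
-- (measurably faster); return values are identical. Dict outputs follow insertion order
-- of the ports; Python's set-iteration order only affects the (order-insensitive) dict order.

-- ===== PORT A =====
def pvSignsA (p : Int) (image : PySem.Set Int) : List (Int × String) :=
  (image.foldl (fun d x => PySem.Dict.insert d (min x (p - x))
      (if x ≤ PySem.Int.floordiv p 2 then "+" else "-")) PySem.Dict.empty).items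

def pvLoopA (seed : List Int) (p k : Int) (target : PySem.Set Int) (a : Int) :
    Bool × Option Int × (Option (List (Int × String))) :=
  if _h : p ≤ a then (false, none, none)
  else
    let image : PySem.Set Int := PySem.Set.ofList (seed.map (fun s => PySem.Int.mod (a * s) p))
    if (PySem.Set.len image) ≠ k then pvLoopA seed p k target (a + 1)
    else
      let absImage : PySem.Set Int := PySem.Set.ofList (image.map (fun x => min x (p - x)))
      if PySem.Set.equal absImage target then (true, some a, some (pvSignsA p image))
      else pvLoopA seed p k target (a + 1)
termination_by (p - a).toNat
decreasing_by all_goals omega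

def check_seed (seed : List Int) (p : Int) (k : Int) : Bool × Option Int × (Option (List (Int × String))) :=
  -- set(range(1, k+1)): the elements are already distinct, so the range list IS this set
  -- (PySem.Set.ofList_eq_self_of_nodup, PySem.List.nodup_pyRange_one)
  let target : PySem.Set Int := PySem.List.pyRange 1 (k + 1) 1
  pvLoopA seed p k target 1

-- ===== PORT B =====
-- extended Euclid: pvEgcd a b = (g, x, y) with x*a + y*b = g = gcd(a,b) (for a,b ≥ 0)
def pvEgcd (a b : Int) : Int × Int × Int :=
  if _h : b = 0 then (a, 1, 0)
  else
    let r := pvEgcd b (PySem.Int.mod a b)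
    (r.1, r.2.2, r.2.1 - PySem.Int.floordiv a b * r.2.2)
termination_by b.natAbs
decreasing_by
  rcases lt_or_gt_of_ne _h with hneg | hpos
  · have := PySem.Int.mod_neg_bounds (a := a) hneg; omega
  · have h1 := PySem.Int.mod_nonneg (a := a) hpos
    have h2 := PySem.Int.mod_lt (a := a) hpos; omega

def pvSignsB (p : Int) (image : PySem.Set Int) : List (Int × String) :=
  (image.foldl (fun d v => PySem.Dict.insert d (min v (p - v))
      (if v ≤ PySem.Int.floordiv p 2 then "+" else "-")) PySem.Dict.empty).items

def pvCands (p k g q inv : Int) : PySem.Set Int :=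
  (PySem.List.pyRange g (k + 1) g).foldl (fun c j =>
    ([j, p - j] : List Int).foldl (fun c t =>
      let base := PySem.Int.mod (inv * PySem.Int.floordiv t g) q
      (PySem.List.pyRange 0 g 1).foldl (fun c m =>
        let a := base + m * q
        if 1 ≤ a ∧ a < p then PySem.Set.add c a else c) c) c) PySem.Set.empty

def pvLoopB (seed : List Int) (p k : Int) :
    List Int → Bool × Option Int × (Option (List (Int × String)))
  | [] => (false, none, none)
  | a :: rest =>
    let image : PySem.Set Int := PySem.Set.ofList (seed.map (fun s => PySem.Int.mod (a * s) p))
    if (PySem.Set.len image) ≠ k then pvLoopB seed p k rest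
    -- set(range(1, k+1)): already distinct, the range list IS this set (ofList_eq_self_of_nodup)
    else if ¬ PySem.Set.equal (PySem.Set.ofList (image.map (fun v => min v (p - v))))
          (PySem.List.pyRange 1 (k + 1) 1) then pvLoopB seed p k rest
    else (true, some a, some (pvSignsB p image))

def check_seed_alt (seed : List Int) (p : Int) (k : Int) : Bool × Option Int × (Option (List (Int × String))) :=
  if p ≤ 1 then (false, none, none)
  else if seed = [] then (if k = 0 then (true, some 1, some []) else (false, none, none))
  else if k < 1 ∨ PySem.Int.floordiv p 2 < k ∨ PySem.List.len seed < k then (false, none, none)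
  -- seed.headD 0 is seed[0]: this branch is reached only with seed ≠ []
  else if PySem.Int.mod (seed.headD 0) p = 0 then (false, none, none)
  else
    pvLoopB seed p k (PySem.List.sorted (pvCands p k
      (pvEgcd (PySem.Int.mod (seed.headD 0) p) p).1
      (PySem.Int.floordiv p (pvEgcd (PySem.Int.mod (seed.headD 0) p) p).1)
      (PySem.Int.mod (pvEgcd (PySem.Int.mod (seed.headD 0) p) p).2.1
        (PySem.Int.floordiv p (pvEgcd (PySem.Int.mod (seed.headD 0) p) p).1))) (fun x => x) false)

-- ===== PRECONDITION & SPEC =====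
def Spec_check_seed (seed : List Int) (p : Int) (k : Int) (out : Bool × Option Int × (Option (List (Int × String)))) : Prop := out = check_seed_alt seed p k
instance (seed : List Int) (p : Int) (k : Int) (out : Bool × Option Int × (Option (List (Int × String)))) : Decidable (Spec_check_seed seed p k out) := by unfold Spec_check_seed; infer_instance

-- ===== CLAIM (what is proved, stated in full; the proofs are below) =====
def Claim_equal_check_seed : Prop := ∀ (seed : List Int) (p : Int) (k : Int), Dom_check_seed seed p k → Spec_check_seed seed p k (check_seed seed p k)

-- ===== LEMMAS AND PROOFS =====

-- the per-multiplier test both loops perform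
def pvImage (seed : List Int) (p a : Int) : PySem.Set Int :=
  PySem.Set.ofList (seed.map (fun s => PySem.Int.mod (a * s) p))

def pvOk (seed : List Int) (p k a : Int) : Bool :=
  if PySem.Set.len (pvImage seed p a) ≠ k then false
  else if PySem.Set.equal (PySem.Set.ofList ((pvImage seed p a).map (fun x => min x (p - x))))
      (PySem.List.pyRange 1 (k + 1) 1) then true else false

lemma loopA_char_aux (seed : List Int) (p k : Int) (n : Nat) : ∀ (a : Int), (p - a).toNat = n →
    pvLoopA seed p k (PySem.List.pyRange 1 (k + 1) 1) a =
      (((PySem.List.pyRange a p 1).find? (pvOk seed p k)).isSome,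
        (PySem.List.pyRange a p 1).find? (pvOk seed p k),
        ((PySem.List.pyRange a p 1).find? (pvOk seed p k)).map
          (fun a => pvSignsA p (pvImage seed p a))) := by
  induction n using Nat.strong_induction_on with
  | _ n ih =>
    intro a hn
    rw [pvLoopA]
    by_cases h : p ≤ a
    · rw [dif_pos h, PySem.List.pyRange_one_eq_nil h]
      rfl
    · rw [dif_neg h]
      simp only []
      have ihrec := ih ((p - (a + 1)).toNat) (by omega) (a + 1) rfl
      have himg : pvImage seed p a = PySem.Set.ofList (seed.map (fun s => PySem.Int.mod (a * s) p)) := rfl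
      rw [← himg, show PySem.List.pyRange a p 1 = a :: PySem.List.pyRange (a + 1) p 1 from
        PySem.List.pyRange_one_cons (by omega)]
      by_cases hlen : PySem.Set.len (pvImage seed p a) = k
      · by_cases heq : PySem.Set.equal (PySem.Set.ofList (List.map (fun x => min x (p - x)) (pvImage seed p a))) (PySem.List.pyRange 1 (k + 1) 1) = true
        · have hok : pvOk seed p k a = true := by
            unfold pvOk; rw [if_neg (fun hh => hh hlen), if_pos heq]
          rw [if_neg (fun hh => hh hlen), if_pos heq, List.find?_cons_of_pos hok]
          rfl
        · have hok : pvOk seed p k a = false := by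
            unfold pvOk; rw [if_neg (fun hh => hh hlen), if_neg heq]
          rw [if_neg (fun hh => hh hlen), if_neg heq, List.find?_cons_of_neg (by simp [hok]), ihrec]
      · have hok : pvOk seed p k a = false := by
          unfold pvOk; rw [if_pos hlen]
        rw [if_pos hlen, List.find?_cons_of_neg (by simp [hok]), ihrec]

lemma loopA_char (seed : List Int) (p k a : Int) :
    pvLoopA seed p k (PySem.List.pyRange 1 (k + 1) 1) a =
      (((PySem.List.pyRange a p 1).find? (pvOk seed p k)).isSome,
        (PySem.List.pyRange a p 1).find? (pvOk seed p k),
        ((PySem.List.pyRange a p 1).find? (pvOk seed p k)).map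
          (fun a => pvSignsA p (pvImage seed p a))) :=
  loopA_char_aux seed p k ((p - a).toNat) a rfl

lemma loopB_char (seed : List Int) (p k : Int) (L : List Int) :
    pvLoopB seed p k L =
      ((L.find? (pvOk seed p k)).isSome, L.find? (pvOk seed p k),
        (L.find? (pvOk seed p k)).map (fun a => pvSignsA p (pvImage seed p a))) := by
  induction L with
  | nil => rfl
  | cons a rest ih =>
    simp only [pvLoopB]
    have himg : pvImage seed p a = PySem.Set.ofList (seed.map (fun s => PySem.Int.mod (a * s) p)) := rfl
    rw [← himg]
    by_cases hlen : PySem.Set.len (pvImage seed p a) = k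
    · by_cases heq : PySem.Set.equal (PySem.Set.ofList (List.map (fun v => min v (p - v)) (pvImage seed p a))) (PySem.List.pyRange 1 (k + 1) 1) = true
      · have hok : pvOk seed p k a = true := by
          unfold pvOk; rw [if_neg (fun h => h hlen), if_pos heq]
        rw [if_neg (fun h => h hlen), if_neg (not_not_intro heq), List.find?_cons_of_pos hok]
        rfl
      · have hok : pvOk seed p k a = false := by
          unfold pvOk; rw [if_neg (fun h => h hlen), if_neg heq]
        rw [if_neg (fun h => h hlen), if_pos heq, List.find?_cons_of_neg (by simp [hok]), ih]
    · have hok : pvOk seed p k a = false := by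
        unfold pvOk; rw [if_pos hlen]
      rw [if_pos hlen, List.find?_cons_of_neg (by simp [hok]), ih]

-- egcd spec
lemma pvEgcd_spec : ∀ (a b : Int), 0 ≤ a → 0 ≤ b →
    (pvEgcd a b).2.1 * a + (pvEgcd a b).2.2 * b = (pvEgcd a b).1 ∧
      (pvEgcd a b).1 ∣ a ∧ (pvEgcd a b).1 ∣ b ∧ 0 ≤ (pvEgcd a b).1 := by
  intro a b
  induction a, b using pvEgcd.induct with
  | case1 a =>
    intro ha _
    rw [pvEgcd]
    simpa using ha
  | case2 a b hb ih =>
    intro _ha hb0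
    have hbpos : 0 < b := lt_of_le_of_ne hb0 (Ne.symm hb)
    have hmod : PySem.Int.mod a b = a % b := PySem.Int.mod_eq_emod_of_pos hbpos
    have hdiv : PySem.Int.floordiv a b = a / b := PySem.Int.floordiv_eq_ediv_of_pos hbpos
    obtain ⟨hbez, hdb, hdm, hdpos⟩ := ih hb0 (by rw [hmod]; exact Int.emod_nonneg a (by omega))
    rw [pvEgcd, dif_neg hb]
    set E := pvEgcd b (PySem.Int.mod a b) with hE
    rw [hmod] at hbez hdm
    have hrec : a % b = a - b * (a / b) := Int.emod_def a b
    refine ⟨?_, ?_, hdb, hdpos⟩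
    · simp only [hdiv]
      linear_combination hbez - E.2.2 * hrec
    · have h2 : E.1 ∣ b * (a / b) + (a % b) := dvd_add (hdb.mul_right _) hdm
      have h3 : b * (a / b) + (a % b) = a := by linarith
      rwa [h3] at h2

-- generic fold invariants
lemma foldl_invariant {α : Type} (Q : PySem.Set Int → Prop) (f : PySem.Set Int → α → PySem.Set Int)
    (L : List α) (c : PySem.Set Int) (hf : ∀ c x, Q c → Q (f c x)) (hc : Q c) :
    Q (L.foldl f c) := by
  induction L generalizing c with
  | nil => exact hc
  | cons x xs ih => exact ih _ (hf _ _ hc)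

lemma mem_foldl_intro {α : Type} [DecidableEq α] (f : PySem.Set Int → α → PySem.Set Int)
    (L : List α) (c : PySem.Set Int) (a : Int) (x : α) (hx : x ∈ L)
    (hmono : ∀ c y, a ∈ c → a ∈ f c y) (hstep : ∀ c, a ∈ f c x) :
    a ∈ L.foldl f c := by
  induction L generalizing c with
  | nil => simp at hx
  | cons y ys ih =>
    rw [List.mem_cons] at hx
    by_cases hxy : x = y
    · subst hxy
      exact foldl_invariant (fun s => a ∈ s) f ys (f c x) hmono (hstep c)
    · exact ih _ (hx.resolve_left hxy)

-- everything in pvCands lies in [1, p)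
lemma cands_bound (p k g q inv : Int) : ∀ a ∈ pvCands p k g q inv, 1 ≤ a ∧ a < p := by
  unfold pvCands
  apply foldl_invariant (Q := fun s => ∀ b ∈ s, 1 ≤ b ∧ b < p)
  · intro c j hc
    apply foldl_invariant (Q := fun s => ∀ b ∈ s, 1 ≤ b ∧ b < p)
    · intro c t hc
      apply foldl_invariant (Q := fun s => ∀ b ∈ s, 1 ≤ b ∧ b < p)
      · intro c m hc
        dsimp only
        split_ifs with hcond
        · intro b hb
          rw [PySem.Set.mem_add] at hb
          rcases hb with hb | hb
          · exact hc b hb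
          · subst hb; exact hcond
        · exact hc
      · exact hc
    · exact hc
  · intro b hb
    simp [PySem.Set.empty] at hb

lemma cands_nodup (p k g q inv : Int) : (pvCands p k g q inv).Nodup := by
  unfold pvCands
  apply foldl_invariant (Q := fun s => s.Nodup)
  · intro c j hc
    apply foldl_invariant (Q := fun s => s.Nodup)
    · intro c t hc
      apply foldl_invariant (Q := fun s => s.Nodup)
      · intro c m hc
        dsimp only
        split_ifs with hcond
        · exact PySem.Set.nodup_add c _ hc
        · exact hc
      · exact hc
    · exact hc
  · simp [PySem.Set.empty]

lemma mem_cands_of (p k g q inv j t m : Int)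
    (hj : j ∈ PySem.List.pyRange g (k + 1) g)
    (ht : t = j ∨ t = p - j)
    (hm : m ∈ PySem.List.pyRange 0 g 1)
    (ha : 1 ≤ PySem.Int.mod (inv * PySem.Int.floordiv t g) q + m * q)
    (hap : PySem.Int.mod (inv * PySem.Int.floordiv t g) q + m * q < p) :
    PySem.Int.mod (inv * PySem.Int.floordiv t g) q + m * q ∈ pvCands p k g q inv := by
  set a := PySem.Int.mod (inv * PySem.Int.floordiv t g) q + m * q with hadef
  have hmono1 : ∀ (c : PySem.Set Int) (y : Int), a ∈ c → a ∈
      (PySem.List.pyRange 0 g 1).foldl (fun c m =>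
        let a' := PySem.Int.mod (inv * PySem.Int.floordiv y g) q + m * q
        if 1 ≤ a' ∧ a' < p then PySem.Set.add c a' else c) c := by
    intro c y hc
    apply foldl_invariant (Q := fun s => a ∈ s)
    · intro c' m' hc'
      dsimp only
      split_ifs with hcond
      · exact (PySem.Set.mem_add _ _ _).mpr (Or.inl hc')
      · exact hc'
    · exact hc
  have hmono2 : ∀ (c : PySem.Set Int) (y : Int), a ∈ c → a ∈
      ([y, p - y] : List Int).foldl (fun c t =>
        let base := PySem.Int.mod (inv * PySem.Int.floordiv t g) q
        (PySem.List.pyRange 0 g 1).foldl (fun c m =>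
          let a' := base + m * q
          if 1 ≤ a' ∧ a' < p then PySem.Set.add c a' else c) c) c := by
    intro c y hc
    apply foldl_invariant (Q := fun s => a ∈ s)
    · intro c' t' hc'
      exact hmono1 c' t' hc'
    · exact hc
  unfold pvCands
  apply mem_foldl_intro _ _ _ _ j hj hmono2
  intro c
  apply mem_foldl_intro _ _ _ _ t (by rcases ht with h | h <;> simp [h]) hmono1
  intro c'
  apply mem_foldl_intro _ _ _ _ m hm
  · intro c'' y hc''
    dsimp only
    split_ifs with hcond
    · exact (PySem.Set.mem_add _ _ _).mpr (Or.inl hc'')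
    · exact hc''
  · intro c''
    dsimp only
    rw [if_pos ⟨ha, hap⟩]
    exact (PySem.Set.mem_add _ _ _).mpr (Or.inr rfl)

-- completeness: any a ∈ [1,p) passing the test is a generated candidate
lemma cands_complete (seed : List Int) (sh p k a : Int) (hseed : seed = sh :: seed.tail)
    (hp : 2 ≤ p) (hs0 : PySem.Int.mod sh p ≠ 0)
    (ha1 : 1 ≤ a) (ha2 : a < p) (hok : pvOk seed p k a = true) :
    a ∈ pvCands p k (pvEgcd (PySem.Int.mod sh p) p).1
      (PySem.Int.floordiv p (pvEgcd (PySem.Int.mod sh p) p).1)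
      (PySem.Int.mod (pvEgcd (PySem.Int.mod sh p) p).2.1
        (PySem.Int.floordiv p (pvEgcd (PySem.Int.mod sh p) p).1)) := by
  have hppos : (0 : Int) < p := by omega
  set s0 := PySem.Int.mod sh p with hs0def
  have hs0lo : 0 ≤ s0 := PySem.Int.mod_nonneg _ hppos
  obtain ⟨hbez, hgs0, hgp, hg0⟩ := pvEgcd_spec s0 p hs0lo (by omega)
  set E := pvEgcd s0 p with hE
  have hgpos : 0 < E.1 := by
    rcases hg0.lt_or_eq with h | h
    · exact h
    · exfalso; exact hs0 (by simpa [← h] using hgs0)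
  obtain ⟨q0, hq0⟩ := hgp
  have hq : PySem.Int.floordiv p E.1 = q0 := by
    rw [PySem.Int.floordiv_eq_ediv_of_pos hgpos, hq0,
      Int.mul_ediv_cancel_left _ (ne_of_gt hgpos)]
  have hqpos : 0 < q0 := by nlinarith
  obtain ⟨s1, hs1⟩ := hgs0
  rw [hq]
  set inv := PySem.Int.mod E.2.1 q0 with hinvdef
  -- extract the abs-image equality from the passed test
  unfold pvOk pvImage at hok
  rw [hseed] at hok
  split_ifs at hok with hlen heq
  rw [PySem.Set.equal_iff] at heq
  -- the first seed element's residue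
  set x := PySem.Int.mod (a * sh) p with hxdef
  have hx0 : 0 ≤ x := PySem.Int.mod_nonneg _ hppos
  have hx1 : x < p := PySem.Int.mod_lt _ hppos
  have hxmem : x ∈ PySem.Set.ofList ((sh :: seed.tail).map (fun s => PySem.Int.mod (a * s) p)) := by
    rw [PySem.Set.mem_ofList]
    exact List.mem_map.mpr ⟨sh, List.mem_cons_self, rfl⟩
  have hjt : min x (p - x) ∈ (PySem.List.pyRange 1 (k + 1) 1 : PySem.Set Int) := by
    apply (heq _).mp
    rw [PySem.Set.mem_ofList]
    exact List.mem_map.mpr ⟨x, hxmem, rfl⟩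
  rw [PySem.List.mem_pyRange_one] at hjt
  set j := min x (p - x) with hjdef
  have hjx : x = j ∨ x = p - j := by
    rcases le_total x (p - x) with h | h
    · exact Or.inl (by rw [hjdef, min_eq_left h])
    · exact Or.inr (by rw [hjdef, min_eq_right h]; omega)
  -- congruence a*s0 ≡ x (mod p)
  have hcong : ∃ c, a * s0 - x = p * c := by
    refine ⟨a * (sh / p) * (-1) + (a * sh) / p, ?_⟩
    have e1 : s0 = sh - p * (sh / p) := by
      rw [hs0def, PySem.Int.mod_eq_emod_of_pos hppos]; exact Int.emod_def sh p
    have e2 : x = a * sh - p * ((a * sh) / p) := by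
      rw [hxdef, PySem.Int.mod_eq_emod_of_pos hppos]; exact Int.emod_def (a * sh) p
    rw [e1, e2]; ring
  obtain ⟨c, hc⟩ := hcong
  -- E.1 divides x
  have hgx : ∃ x1, x = E.1 * x1 := by
    refine ⟨a * s1 - q0 * c, ?_⟩
    have : a * (E.1 * s1) - x = (E.1 * q0) * c := by rw [← hs1, ← hq0]; exact hc
    linarith [this]
  obtain ⟨x1, hxx1⟩ := hgx
  -- reduced congruence and reduced Bezout identity
  have hred : a * s1 - x1 = q0 * c := by
    have h2 : E.1 * (a * s1 - x1) = E.1 * (q0 * c) := by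
      have : a * (E.1 * s1) - E.1 * x1 = (E.1 * q0) * c := by rw [← hs1, ← hxx1, ← hq0]; exact hc
      linarith [this]
    exact mul_left_cancel₀ (ne_of_gt hgpos) h2
  have hbez1 : E.2.1 * s1 + E.2.2 * q0 = 1 := by
    have h2 : E.1 * (E.2.1 * s1 + E.2.2 * q0) = E.1 * 1 := by
      have : E.2.1 * (E.1 * s1) + E.2.2 * (E.1 * q0) = E.1 := by rw [← hs1, ← hq0]; exact hbez
      linarith [this]
    exact mul_left_cancel₀ (ne_of_gt hgpos) h2
  -- inv * x1 ≡ a (mod q0)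
  have hinveq : inv = E.2.1 - q0 * (E.2.1 / q0) := by
    rw [hinvdef, PySem.Int.mod_eq_emod_of_pos hqpos]; exact Int.emod_def _ _
  have hdvd : a - inv * x1 = q0 * (E.2.1 * c + a * E.2.2 + (E.2.1 / q0) * x1) := by
    rw [hinveq]; linear_combination E.2.1 * hred - a * hbez1
  have hmodq : PySem.Int.mod (inv * x1) q0 = a % q0 := by
    rw [PySem.Int.mod_eq_emod_of_pos hqpos]
    rw [Int.emod_eq_emod_iff_emod_sub_eq_zero]
    have : inv * x1 - a = q0 * (-(E.2.1 * c + a * E.2.2 + (E.2.1 / q0) * x1)) := by linarith [hdvd]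
    rw [this]
    exact Int.mul_emod_right _ _
  -- decompose a on the candidate grid
  have hfl : PySem.Int.floordiv x E.1 = x1 := by
    rw [PySem.Int.floordiv_eq_ediv_of_pos hgpos, hxx1,
      Int.mul_ediv_cancel_left _ (ne_of_gt hgpos)]
  set m := a / q0 with hmdef
  have hm0 : 0 ≤ m := Int.ediv_nonneg (by omega) (le_of_lt hqpos)
  have hmg : m < E.1 := by
    rw [hmdef]
    rw [Int.ediv_lt_iff_lt_mul hqpos]
    nlinarith [ha2, hq0]
  have hdecomp : a = PySem.Int.mod (inv * PySem.Int.floordiv x E.1) q0 + m * q0 := by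
    rw [hfl, hmodq]
    have : a % q0 = a - q0 * (a / q0) := Int.emod_def a q0
    rw [this, hmdef]; ring
  -- divisibility facts about j
  have hgj : E.1 ∣ j := by
    rcases hjx with h | h
    · exact ⟨x1, by rw [← h]; exact hxx1⟩
    · exact ⟨q0 - x1, by rw [mul_sub, ← hxx1, ← hq0]; omega⟩
  have hj1 : 1 ≤ j := hjt.1
  have hjmem : j ∈ PySem.List.pyRange E.1 (k + 1) E.1 := by
    rw [PySem.List.mem_pyRange_iff_of_pos hgpos]
    refine ⟨Int.le_of_dvd (by omega) hgj, hjt.2, ?_⟩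
    exact dvd_sub hgj dvd_rfl
  have hmmem : m ∈ PySem.List.pyRange 0 E.1 1 := by
    rw [PySem.List.mem_pyRange_one]; omega
  have := mem_cands_of p k E.1 q0 inv j x m hjmem hjx hmmem
    (by rw [← hdecomp]; exact ha1) (by rw [← hdecomp]; exact ha2)
  rwa [← hdecomp] at this

-- two strictly increasing lists that agree on which ok-elements they contain find the same first ok-element
lemma find?_agree (ok : Int → Bool) (L1 L2 : List Int)
    (h1 : L1.Pairwise (· < ·)) (h2 : L2.Pairwise (· < ·))
    (h12 : ∀ a ∈ L1, ok a = true → a ∈ L2) (h21 : ∀ a ∈ L2, ok a = true → a ∈ L1) :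
    L1.find? ok = L2.find? ok := by
  rw [← List.head?_filter, ← List.head?_filter]
  have hs1 : (L1.filter ok).Pairwise (· < ·) := h1.filter ok
  have hs2 : (L2.filter ok).Pairwise (· < ·) := h2.filter ok
  have hperm : (L1.filter ok).Perm (L2.filter ok) := by
    rw [List.perm_ext_iff_of_nodup (hs1.imp ne_of_lt) (hs2.imp ne_of_lt)]
    intro a
    rw [List.mem_filter, List.mem_filter]
    constructor
    · rintro ⟨hm, ho⟩; exact ⟨h12 a hm ho, ho⟩
    · rintro ⟨hm, ho⟩; exact ⟨h21 a hm ho, ho⟩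
  rw [List.Perm.eq_of_pairwise (fun a b _ _ hx hy => le_antisymm hx hy) (hs1.imp le_of_lt) (hs2.imp le_of_lt) hperm]

-- the early-exit cases: nothing passes the test
lemma ok_false_cases (seed : List Int) (p k a : Int)
    (h : (seed ≠ [] ∧ k < 1) ∨ (seed ≠ [] ∧ PySem.Int.floordiv p 2 < k ∧ 2 ≤ p) ∨
         (∃ sh t, seed = sh :: t ∧ PySem.Int.mod sh p = 0 ∧ 2 ≤ p ∧ 1 ≤ k) ∨
         (seed = [] ∧ k ≠ 0) ∨ ((seed.length : Int) < k)) :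
    pvOk seed p k a = false := by
  unfold pvOk pvImage
  rcases h with ⟨hne, hk⟩ | ⟨hne, hk, hp⟩ | ⟨sh, t, hseed, hsh, hp, hk⟩ | ⟨hseed, hk⟩ | hlen
  · rw [if_pos]
    rw [PySem.Set.len_eq]
    obtain ⟨s, hs⟩ := List.exists_mem_of_ne_nil seed hne
    have hmem : PySem.Int.mod (a * s) p ∈ PySem.Set.ofList (seed.map (fun s => PySem.Int.mod (a * s) p)) :=
      (PySem.Set.mem_ofList _ _).mpr (List.mem_map_of_mem hs)
    have hpos := List.length_pos_of_mem hmem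
    omega
  · by_cases hlen : PySem.Set.len (PySem.Set.ofList (seed.map (fun s => PySem.Int.mod (a * s) p))) = k
    · rw [if_neg (fun hh => hh hlen), if_neg]
      intro heq
      rw [PySem.Set.equal_iff] at heq
      have hfd : PySem.Int.floordiv p 2 = p / 2 := PySem.Int.floordiv_eq_ediv_of_pos (by omega)
      rw [hfd] at hk
      have hkmem : (k : Int) ∈ (PySem.List.pyRange 1 (k + 1) 1 : PySem.Set Int) := by
        rw [PySem.List.mem_pyRange_one]; omega
      have hmem := (heq k).mpr hkmem
      rw [PySem.Set.mem_ofList] at hmem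
      obtain ⟨x, hx, hmin⟩ := List.mem_map.mp hmem
      rw [PySem.Set.mem_ofList] at hx
      obtain ⟨s, _hs, rfl⟩ := List.mem_map.mp hx
      have h0 : 0 ≤ PySem.Int.mod (a * s) p := PySem.Int.mod_nonneg _ (by omega)
      have h1 : PySem.Int.mod (a * s) p < p := PySem.Int.mod_lt _ (by omega)
      rcases le_total (PySem.Int.mod (a * s) p) (p - PySem.Int.mod (a * s) p) with hle | hle
      · rw [min_eq_left hle] at hmin; omega
      · rw [min_eq_right hle] at hmin; omega
    · rw [if_pos hlen]
  · subst hseed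
    by_cases hlen : PySem.Set.len (PySem.Set.ofList ((sh :: t).map (fun s => PySem.Int.mod (a * s) p))) = k
    · rw [if_neg (fun hh => hh hlen), if_neg]
      intro heq
      rw [PySem.Set.equal_iff] at heq
      have hx0 : PySem.Int.mod (a * sh) p = 0 := by
        rw [PySem.Int.mod_eq_zero_iff_dvd] at hsh ⊢
        exact hsh.mul_left a
      have hmem : (0 : Int) ∈ PySem.Set.ofList ((sh :: t).map (fun s => PySem.Int.mod (a * s) p)) := by
        rw [PySem.Set.mem_ofList]
        exact List.mem_map.mpr ⟨sh, List.mem_cons_self, hx0⟩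
      have habs : (0 : Int) ∈ PySem.Set.ofList
          ((PySem.Set.ofList ((sh :: t).map (fun s => PySem.Int.mod (a * s) p))).map (fun x => min x (p - x))) := by
        rw [PySem.Set.mem_ofList]
        exact List.mem_map.mpr ⟨0, hmem, by rw [sub_zero]; exact min_eq_left (by omega)⟩
      have := (heq 0).mp habs
      rw [PySem.List.mem_pyRange_one] at this
      omega
    · rw [if_pos hlen]
  · subst hseed
    rw [if_pos]
    rw [PySem.Set.len_eq]
    intro hcontra
    simp [PySem.Set.ofList] at hcontra
    omega
  · rw [if_pos]
    rw [PySem.Set.len_eq]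
    have hle := PySem.Set.length_ofList_le (seed.map (fun s => PySem.Int.mod (a * s) p))
    rw [List.length_map] at hle
    omega

lemma pairwise_lt_sorted_cands (p k g q inv : Int) :
    (PySem.List.sorted (pvCands p k g q inv) (fun x => x) false).Pairwise (· < ·) := by
  have hle : (PySem.List.sorted (pvCands p k g q inv) (fun x => x) false).Pairwise (· ≤ ·) :=
    PySem.List.sorted_pairwise _ _
  have hnd : (PySem.List.sorted (pvCands p k g q inv) (fun x => x) false).Nodup :=
    ((PySem.List.sorted_perm _ _ _).nodup_iff).mpr (cands_nodup p k g q inv)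
  exact (hle.and hnd).imp (fun h => lt_of_le_of_ne h.1 h.2)

theorem check_seed_spec : Claim_equal_check_seed := by
  intro seed p k _hdom
  unfold Spec_check_seed check_seed check_seed_alt
  show pvLoopA seed p k (PySem.List.pyRange 1 (k + 1) 1) 1 = _
  rw [loopA_char]
  by_cases hp : p ≤ 1
  · rw [if_pos hp, PySem.List.pyRange_one_eq_nil hp]
    rfl
  · rw [if_neg hp]
    rcases seed with _ | ⟨sh, t⟩
    · rw [if_pos rfl]
      by_cases hk : k = 0
      · subst hk
        have hok1 : pvOk [] p 0 1 = true := by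
          unfold pvOk pvImage
          rw [if_neg (by simp [PySem.Set.len_eq, PySem.Set.ofList])]
          rw [if_pos]
          rw [PySem.Set.equal_iff]
          intro y
          simp [PySem.Set.ofList]
        rw [show PySem.List.pyRange 1 p 1 = 1 :: PySem.List.pyRange 2 p 1 by
            have := PySem.List.pyRange_one_cons (a := 1) (b := p) (by omega)
            simpa using this,
          List.find?_cons_of_pos hok1]
        rw [if_pos rfl]
        rfl
      · rw [List.find?_eq_none.mpr (fun a _ => by
          rw [ok_false_cases [] p k a (Or.inr (Or.inr (Or.inr (Or.inl ⟨rfl, hk⟩))))]; simp)]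
        rw [if_neg hk]
        rfl
    · rw [if_neg (by simp)]
      by_cases hkr : k < 1 ∨ PySem.Int.floordiv p 2 < k ∨ PySem.List.len (sh :: t) < k
      · rw [List.find?_eq_none.mpr (fun a _ => by
          rw [ok_false_cases (sh :: t) p k a (by
            rcases hkr with h | h | h
            · exact Or.inl ⟨by simp, h⟩
            · exact Or.inr (Or.inl ⟨by simp, h, by omega⟩)
            · exact Or.inr (Or.inr (Or.inr (Or.inr (by
                rw [PySem.List.len_eq] at h; exact h)))))]; simp)]
        rw [if_pos hkr]
        rfl
      · rw [if_neg hkr]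
        rw [not_or, not_or, not_lt, not_lt, not_lt] at hkr
        obtain ⟨hk1, hk2, hk3⟩ := hkr
        by_cases hs0 : PySem.Int.mod ((sh :: t).headD 0) p = 0
        · rw [List.find?_eq_none.mpr (fun a _ => by
            rw [ok_false_cases (sh :: t) p k a
              (Or.inr (Or.inr (Or.inl ⟨sh, t, rfl, by simpa using hs0, by omega, by omega⟩)))]; simp)]
          rw [if_pos hs0]
          rfl
        · rw [if_neg hs0]
          rw [loopB_char]
          have hs0' : PySem.Int.mod sh p ≠ 0 := by simpa using hs0
          have hfind : (PySem.List.pyRange 1 p 1).find? (pvOk (sh :: t) p k) =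
              (PySem.List.sorted (pvCands p k (pvEgcd (PySem.Int.mod ((sh :: t).headD 0) p) p).1
                (PySem.Int.floordiv p (pvEgcd (PySem.Int.mod ((sh :: t).headD 0) p) p).1)
                (PySem.Int.mod (pvEgcd (PySem.Int.mod ((sh :: t).headD 0) p) p).2.1
                  (PySem.Int.floordiv p (pvEgcd (PySem.Int.mod ((sh :: t).headD 0) p) p).1)))
                (fun x => x) false).find? (pvOk (sh :: t) p k) := by
            apply find?_agree
            · exact PySem.List.pairwise_lt_pyRange_one 1 p
            · exact pairwise_lt_sorted_cands _ _ _ _ _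
            · intro a ha hok
              rw [PySem.List.mem_pyRange_one] at ha
              rw [PySem.List.mem_sorted]
              exact cands_complete (sh :: t) sh p k a rfl (by omega) hs0' ha.1 ha.2 hok
            · intro a ha _hok
              rw [PySem.List.mem_sorted] at ha
              have := cands_bound _ _ _ _ _ a ha
              rw [PySem.List.mem_pyRange_one]
              omega
          rw [hfind]
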